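-- pv_equiv track=rewrite | github.com/modularizer/digitize | digitize.py | _int_nth_root_exact
-- ===== SOURCE A (Python) =====
-- from math import isqrt
--
-- def _int_nth_root_exact(n: int, k: int) -> int | None:
--     """Return exact integer r such that r**k == n, else None. n>=0, k>=1."""
--     if n < 0:
--         return None
--     if k == 1:
--         return n
--     if n in (0, 1):
--         return n
--     if k == 2:
--         r = isqrt(n)
--         return r if r * r == n else None
--
--     # binary search
--     lo, hi = 0, 1
--     while hi**k < n:
--         hi *= 2
--     while lo + 1 < hi:
--         mid = (lo + hi) // 2
--         p = mid**k
--         if p == n: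
--             return mid
--         if p < n:
--             lo = mid
--         else:
--             hi = mid
--     return None
-- ===== SOURCE B (Python) =====
-- def _int_nth_root_exact(n: int, k: int) -> int | None:
--     """Return exact integer r such that r**k == n, else None. n>=0, k>=1."""
--     if n < 0:
--         return None
--     if k == 1:
--         return n
--     if n < 2:
--         return n
--     # integer Newton iteration for floor(n ** (1/k)), started at 2**ceil(bit_length/k) >= the root
--     x = 1 << -(-n.bit_length() // k)
--     y = ((k - 1) * x + n // x ** (k - 1)) // k
--     while y < x:
--         x = y
--         y = ((k - 1) * x + n // x ** (k - 1)) // k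
--     return x if x ** k == n else None
-- ===== Notes on version B (the rewrite author's own statement) =====
-- stated objective: alternative
-- what changed: Replaced the doubling+binary-search bracket with an integer Newton iteration that maintains a single decreasing estimate x (y = ((k-1)x + n//x**(k-1))//k) and checks x**k == n at the end; this also fixes A's missed roots when the doubling loop lands exactly on the root.
-- intended difference: For k >= 3 and n an exact power 2^(j*k) (j >= 1) A returns None although 2^j is an exact k-th root, because its doubling loop stops with hi equal to the root and the binary search never tests hi; B returns the root 2^j, which is the documented intended value. — e.g. on _int_nth_root_exact(8, 3): A returns none, B returns some 2
import Mathlib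
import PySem

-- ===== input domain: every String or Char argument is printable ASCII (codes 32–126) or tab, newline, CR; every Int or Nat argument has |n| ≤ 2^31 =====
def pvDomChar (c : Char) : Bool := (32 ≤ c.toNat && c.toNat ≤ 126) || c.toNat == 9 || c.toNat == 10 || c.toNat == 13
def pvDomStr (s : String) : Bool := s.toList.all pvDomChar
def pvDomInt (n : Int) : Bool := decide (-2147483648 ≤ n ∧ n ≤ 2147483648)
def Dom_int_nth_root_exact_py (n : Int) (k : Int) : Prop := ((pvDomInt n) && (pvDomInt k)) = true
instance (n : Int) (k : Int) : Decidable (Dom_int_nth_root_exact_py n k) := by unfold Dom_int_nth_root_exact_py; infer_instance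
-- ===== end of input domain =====

-- B replaces A's doubling + binary-search bracket by an integer Newton iteration; on n = 2^(j*k) with
-- k ≥ 3 A misses the root (returns none) while B returns it — see D_ below.

-- ===== PORT A =====
-- 'while hi**k < n: hi *= 2', ported with fuel 64: hi doubles each step, so 64 steps always reach
-- hi^k ≥ n for the admitted inputs (|n| ≤ 2^31, and k ≥ 1 inside Pre_; for k ≤ 0, n ≥ 2 the Python
-- loop diverges — those inputs are excluded by Pre_).  '**' with k ≥ 1 is ^ k.toNat, '//' is floordiv.
def pvDouble (n k : Int) : Int → Nat → Int
  | hi, 0 => hi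
  | hi, f + 1 => if hi ^ k.toNat < n then pvDouble n k (2 * hi) f else hi

-- 'while lo + 1 < hi: …', ported with fuel 64: the bracket at least halves each step and its initial
-- width is ≤ 2^64 on the admitted inputs, so the fuel is never exhausted (pv_bins_some/none below).
def pvBinSearch (n k : Int) : Int → Int → Nat → Option Int
  | _, _, 0 => none
  | lo, hi, f + 1 =>
    if lo + 1 < hi then
      let mid := PySem.Int.floordiv (lo + hi) 2
      let p := mid ^ k.toNat
      if p = n then some mid
      else if p < n then pvBinSearch n k mid hi f
      else pvBinSearch n k lo mid f
    else none

-- math.isqrt(n): Int.sqrt (Mathlib's Nat.sqrt on n.toNat), exact on the n ≥ 0 path where A calls it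
def int_nth_root_exact_py (n : Int) (k : Int) : Option Int :=
  if n < 0 then none
  else if k = 1 then some n
  else if n = 0 ∨ n = 1 then some n
  else if k = 2 then
    let r := Int.sqrt n
    if r * r = n then some r else none
  else
    pvBinSearch n k 0 (pvDouble n k 1 64) 64

-- ===== PORT B =====
-- 'while y < x: x = y; y = ((k-1)*x + n//x**(k-1))//k', ported with fuel n.toNat + 1: x strictly
-- decreases each iteration and stays ≥ 1 on the inputs that reach the loop, so the fuel is never
-- exhausted there (pv_newton_root below proves the loop lands on the root within this fuel).
def pvNewton (n k : Int) : Nat → Int → Int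
  | 0, x => x
  | f + 1, x =>
    let y := PySem.Int.floordiv ((k - 1) * x + PySem.Int.floordiv n (x ^ (k - 1).toNat)) k
    if y < x then pvNewton n k f y else x

-- '1 << -(-n.bit_length() // k)': 2^ceil(bit_length/k), an overestimate of the k-th root; the shift
-- amount is ≥ 0 on the k ≥ 1 inputs that reach it, so '.toNat' is exact there
def pvStart (n k : Int) : Int :=
  (1 : Int) <<< (-(PySem.Int.floordiv (-(PySem.Int.bitLength n : Int)) k)).toNat

def int_nth_root_exact_py_alt (n : Int) (k : Int) : Option Int :=
  if n < 0 then none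
  else if k = 1 then some n
  else if n < 2 then some n
  else
    let x := pvNewton n k (n.toNat + 1) (pvStart n k)
    if x ^ k.toNat = n then some x else none

-- ===== PRECONDITION & SPEC =====
-- Pre_ excludes k ≤ 0 with n ≥ 2: there A's doubling loop never terminates (hi**k never reaches n).
def Pre_int_nth_root_exact_py (n : Int) (k : Int) : Prop := 1 ≤ k ∨ n ≤ 1
instance (n : Int) (k : Int) : Decidable (Pre_int_nth_root_exact_py n k) := by unfold Pre_int_nth_root_exact_py; infer_instance
def pvWitness_int_nth_root_exact_py : Int × Int := (27, 3)

-- For k ≥ 3 and n = 2^(j*k) (j ≥ 1) A returns none although 2^j is an exact k-th root (its doubling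
-- loop stops with hi equal to the root, which the binary search never tests); B returns some 2^j,
-- the intended value.
def D_int_nth_root_exact_py (n : Int) (k : Int) : Prop :=
  2 ≤ n ∧ 3 ≤ k ∧ ∃ j ∈ Finset.Icc 1 10, j * k.toNat ≤ 31 ∧ n = 2 ^ (j * k.toNat)
instance (n : Int) (k : Int) : Decidable (D_int_nth_root_exact_py n k) := by unfold D_int_nth_root_exact_py; infer_instance

def Spec_int_nth_root_exact_py (n : Int) (k : Int) (out : Option Int) : Prop :=
  ¬ D_int_nth_root_exact_py n k → out = int_nth_root_exact_py_alt n k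
instance (n : Int) (k : Int) (out : Option Int) : Decidable (Spec_int_nth_root_exact_py n k out) := by unfold Spec_int_nth_root_exact_py; infer_instance

def pvDiffWitness_int_nth_root_exact_py : Int × Int := (8, 3)
def pvDiffWitnessOut_int_nth_root_exact_py : (Option Int) × (Option Int) := (none, some 2)

-- ===== CLAIM (what is proved, stated in full; the proofs are below) =====
def Claim_unchanged_int_nth_root_exact_py : Prop := ∀ (n : Int) (k : Int), Dom_int_nth_root_exact_py n k → Pre_int_nth_root_exact_py n k → Spec_int_nth_root_exact_py n k (int_nth_root_exact_py n k)
def Claim_changed_int_nth_root_exact_py : Prop := Dom_int_nth_root_exact_py (pvDiffWitness_int_nth_root_exact_py.1) (pvDiffWitness_int_nth_root_exact_py.2) ∧ Pre_int_nth_root_exact_py (pvDiffWitness_int_nth_root_exact_py.1) (pvDiffWitness_int_nth_root_exact_py.2) ∧ D_int_nth_root_exact_py (pvDiffWitness_int_nth_root_exact_py.1) (pvDiffWitness_int_nth_root_exact_py.2) ∧ int_nth_root_exact_py (pvDiffWitness_int_nth_root_exact_py.1) (pvDiffWitness_int_nth_root_exact_py.2) = pvDiffWitnessOut_int_nth_root_exact_py.1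 ∧ int_nth_root_exact_py_alt (pvDiffWitness_int_nth_root_exact_py.1) (pvDiffWitness_int_nth_root_exact_py.2) = pvDiffWitnessOut_int_nth_root_exact_py.2 ∧ pvDiffWitnessOut_int_nth_root_exact_py.1 ≠ pvDiffWitnessOut_int_nth_root_exact_py.2
def Claim_exact_int_nth_root_exact_py : Prop := ∀ (n : Int) (k : Int), Dom_int_nth_root_exact_py n k → Pre_int_nth_root_exact_py n k → D_int_nth_root_exact_py n k → int_nth_root_exact_py n k ≠ int_nth_root_exact_py_alt n k

-- ===== LEMMAS AND PROOFS =====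

-- (x^p - r^p) and (x - r) have the same sign on nonnegatives
theorem pv_sign (p : Nat) (x r : Int) (hx : 0 ≤ x) (hr : 0 ≤ r) :
    0 ≤ (x ^ p - r ^ p) * (x - r) := by
  rcases le_total r x with h | h
  · exact mul_nonneg (by have := pow_le_pow_left₀ hr h p; omega) (by omega)
  · have h1 := pow_le_pow_left₀ hx h p
    have hnn := mul_nonneg (show (0:Int) ≤ r ^ p - x ^ p by omega) (show (0:Int) ≤ r - x by omega)
    nlinarith [hnn]

-- AM–GM-type inequality: (m+1)·r·x^m ≤ m·x^(m+1) + r^(m+1) for x, r ≥ 0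
theorem pv_amgm (m : Nat) (x r : Int) (hx : 0 ≤ x) (hr : 0 ≤ r) :
    ((m : Int) + 1) * r * x ^ m ≤ (m : Int) * x ^ (m + 1) + r ^ (m + 1) := by
  induction m with
  | zero => simp
  | succ m ih =>
    have hs := pv_sign (m + 1) x r hx hr
    obtain ⟨a, ha⟩ : ∃ a, x ^ m = a := ⟨_, rfl⟩
    obtain ⟨c, hc⟩ : ∃ c, r ^ (m + 1) = c := ⟨_, rfl⟩
    have ex1 : x ^ (m + 1) = a * x := by rw [pow_succ, ha]
    have ex2 : x ^ (m + 1 + 1) = a * x * x := by rw [pow_succ, ex1]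
    have er2 : r ^ (m + 1 + 1) = c * r := by rw [pow_succ, hc]
    rw [ha, ex1] at ih
    rw [ex1, hc] at hs
    have hmul := mul_le_mul_of_nonneg_right ih hx
    push_cast
    rw [ex2, er2, ex1]
    nlinarith [hmul, hs]

-- a^p = b^p → a = b on nonnegatives (p ≥ 1)
theorem pv_pow_inj (p : Nat) (hp : 1 ≤ p) (a b : Int) (ha : 0 ≤ a) (hb : 0 ≤ b)
    (h : a ^ p = b ^ p) : a = b := by
  rcases lt_trichotomy a b with hlt | he | hgt
  · have := pow_lt_pow_left₀ hlt ha (by omega : p ≠ 0); omega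
  · exact he
  · have := pow_lt_pow_left₀ hgt hb (by omega : p ≠ 0); omega

-- Newton step stays ≥ any nonnegative r with r^k ≤ n
theorem pv_newton_ge (n k x r : Int) (hk : 2 ≤ k) (hx : 1 ≤ x) (hr : 0 ≤ r)
    (hrn : r ^ k.toNat ≤ n) :
    r ≤ PySem.Int.floordiv ((k - 1) * x + PySem.Int.floordiv n (x ^ (k - 1).toNat)) k := by
  have hkpos : (0:Int) < k := by omega
  have hxp : (0:Int) < x ^ (k - 1).toNat := pow_pos (by omega) _
  rw [PySem.Int.le_floordiv_iff_mul_le hkpos]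
  have h2 : r * k - (k - 1) * x ≤ PySem.Int.floordiv n (x ^ (k - 1).toNat) := by
    rw [PySem.Int.le_floordiv_iff_mul_le hxp]
    have hm : (k - 1).toNat + 1 = k.toNat := by omega
    have hamgm := pv_amgm (k - 1).toNat x r (by omega) hr
    have hc1 : (((k - 1).toNat : Int)) = k - 1 := by omega
    rw [hc1, hm] at hamgm
    have hxk : x ^ k.toNat = x * x ^ (k - 1).toNat := by rw [← hm, pow_succ]; ring
    nlinarith [hamgm, hrn, hxk]
  linarith

-- Newton step decreases while x is strictly above the exact root
theorem pv_newton_lt (n k x r : Int) (hk : 2 ≤ k) (hr : 0 ≤ r) (hrx : r < x)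
    (hrn : r ^ k.toNat = n) :
    PySem.Int.floordiv ((k - 1) * x + PySem.Int.floordiv n (x ^ (k - 1).toNat)) k < x := by
  have hkpos : (0:Int) < k := by omega
  have hxp : (0:Int) < x ^ (k - 1).toNat := pow_pos (by omega) _
  rw [PySem.Int.floordiv_lt_iff_lt_mul hkpos]
  have h2 : PySem.Int.floordiv n (x ^ (k - 1).toNat) < x := by
    rw [PySem.Int.floordiv_lt_iff_lt_mul hxp]
    have hm : (k - 1).toNat + 1 = k.toNat := by omega
    have hlt : r ^ k.toNat < x ^ k.toNat :=
      pow_lt_pow_left₀ hrx hr (by omega : k.toNat ≠ 0)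
    have hxk : x ^ k.toNat = x * x ^ (k - 1).toNat := by rw [← hm, pow_succ]; ring
    omega
  linarith

-- with an exact root r ≥ 1 at or below the start, the Newton loop lands exactly on r
theorem pv_newton_root (n k r : Int) (hk : 2 ≤ k) (hr : 1 ≤ r) (hrn : r ^ k.toNat = n) :
    ∀ (f : Nat) (x : Int), r ≤ x → (x - r).toNat < f → pvNewton n k f x = r := by
  intro f
  induction f with
  | zero => intro x _ h; omega
  | succ f ih =>
    intro x hrx hfx
    have hx1 : 1 ≤ x := by omega
    have hge := pv_newton_ge n k x r hk hx1 (by omega) hrn.le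
    simp only [pvNewton]
    rcases eq_or_lt_of_le hrx with he | hlt
    · rw [if_neg (by omega)]; omega
    · have hylt := pv_newton_lt n k x r hk (by omega) hlt hrn
      rw [if_pos hylt]
      exact ih _ hge (by omega)

-- the Newton loop keeps x ≥ 1 (for n ≥ 1, any fuel)
theorem pv_newton_pos (n k : Int) (hk : 2 ≤ k) (hn : 1 ≤ n) :
    ∀ (f : Nat) (x : Int), 1 ≤ x → 1 ≤ pvNewton n k f x := by
  intro f
  induction f with
  | zero => intro x hx; simpa [pvNewton] using hx
  | succ f ih =>
    intro x hx
    have hge := pv_newton_ge n k x 1 hk hx (by omega) (by simpa using hn)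
    simp only [pvNewton]
    split
    · exact ih _ hge
    · exact hx

-- the Newton start 2^ceil(bit_length/k): at least 1, at most n, and its k-th power exceeds n
theorem pv_start_spec (n k : Int) (hn : 2 ≤ n) (hk : 2 ≤ k) :
    1 ≤ pvStart n k ∧ pvStart n k ≤ n ∧ n < (pvStart n k) ^ k.toNat := by
  have hb1 : n.natAbs < 2 ^ PySem.Int.bitLength n := PySem.Int.lt_two_pow_bitLength n
  have hb2 : 2 ^ (PySem.Int.bitLength n - 1) ≤ n.natAbs :=
    PySem.Int.two_pow_bitLength_le n (by omega)
  obtain ⟨b, hb⟩ : ∃ b, PySem.Int.bitLength n = b := ⟨_, rfl⟩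
  rw [hb] at hb1 hb2
  have hble : 2 ≤ b := by
    by_contra hcon
    have h01 : (2:Nat) ^ b ≤ 2 ^ 1 := Nat.pow_le_pow_right (by norm_num) (by omega)
    omega
  obtain ⟨c, hcdef⟩ : ∃ c, -(PySem.Int.floordiv (-(PySem.Int.bitLength n : Int)) k) = c :=
    ⟨_, rfl⟩
  obtain ⟨hlow, hhigh⟩ :=
    (PySem.Int.neg_floordiv_neg_eq_iff_of_pos (show (0:Int) < k by omega)).mp hcdef
  rw [hb] at hlow hhigh
  have hstart : pvStart n k = 2 ^ c.toNat := by
    rw [pvStart, hcdef, Int.shiftLeft_eq]; ring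
  have hc1 : 1 ≤ c := by
    by_contra hcon
    have : c * k ≤ 0 := mul_nonpos_iff.mpr (Or.inr ⟨by omega, by omega⟩)
    omega
  have h2c : 2 * (c - 1) ≤ (c - 1) * k := by nlinarith
  have hcb : c ≤ (b : Int) - 1 := by omega
  have hx1 : 1 ≤ pvStart n k := by
    rw [hstart]
    have := pow_pos (show (0:Int) < 2 by norm_num) c.toNat
    omega
  refine ⟨hx1, ?_, ?_⟩
  · -- pvStart ≤ 2^(b-1) ≤ n
    rw [hstart]
    have hcn : c.toNat ≤ b - 1 := by omega
    have h1 : (2:Int) ^ c.toNat ≤ 2 ^ (b - 1) := pow_le_pow_right₀ (by norm_num) hcn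
    have h2 : ((2 ^ (b - 1) : Nat) : Int) ≤ n := by
      rw [← Int.natAbs_of_nonneg (by omega : (0:Int) ≤ n)]
      exact_mod_cast hb2
    push_cast at h2
    omega
  · -- n < 2^b ≤ (pvStart)^k
    rw [hstart, ← pow_mul]
    have hck : b ≤ c.toNat * k.toNat := by
      have hc' : ((c.toNat : Int)) = c := by omega
      have hk' : ((k.toNat : Int)) = k := by omega
      have : ((b : Int)) ≤ ((c.toNat * k.toNat : Nat) : Int) := by push_cast; rw [hc', hk']; exact hhigh
      exact_mod_cast this
    have h3 : (2:Nat) ^ b ≤ 2 ^ (c.toNat * k.toNat) := Nat.pow_le_pow_right (by norm_num) hck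
    have h4 : ((n.natAbs : Nat) : Int) = n := Int.natAbs_of_nonneg (by omega)
    have h5 : ((2 ^ (c.toNat * k.toNat) : Nat) : Int) = (2:Int) ^ (c.toNat * k.toNat) := by
      push_cast; ring
    have h6 : n.natAbs < 2 ^ (c.toNat * k.toNat) := by omega
    calc n = ((n.natAbs : Nat) : Int) := h4.symm
    _ < ((2 ^ (c.toNat * k.toNat) : Nat) : Int) := by exact_mod_cast h6
    _ = (2:Int) ^ (c.toNat * k.toNat) := h5

-- B's value when an exact root r ≥ 2 exists
theorem pv_alt_some (n k r : Int) (hn : 2 ≤ n) (hk : 2 ≤ k) (hr : 2 ≤ r)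
    (hrn : r ^ k.toNat = n) : int_nth_root_exact_py_alt n k = some r := by
  obtain ⟨hs1, hs2, hs3⟩ := pv_start_spec n k hn hk
  have hrx : r ≤ pvStart n k := by
    by_contra hcon
    have : (pvStart n k) ^ k.toNat ≤ r ^ k.toNat := pow_le_pow_left₀ (by omega) (by omega) _
    omega
  have hroot := pv_newton_root n k r hk (by omega) hrn (n.toNat + 1) (pvStart n k) hrx (by omega)
  unfold int_nth_root_exact_py_alt
  rw [if_neg (by omega), if_neg (by omega), if_neg (by omega)]
  simp [hroot, hrn]

-- B's value when no exact root exists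
theorem pv_alt_none (n k : Int) (hn : 2 ≤ n) (hk : 2 ≤ k)
    (h : ∀ r : Int, 0 ≤ r → r ^ k.toNat ≠ n) : int_nth_root_exact_py_alt n k = none := by
  unfold int_nth_root_exact_py_alt
  rw [if_neg (by omega), if_neg (by omega), if_neg (by omega)]
  obtain ⟨hs1, _, _⟩ := pv_start_spec n k hn hk
  have hx1 : 1 ≤ pvNewton n k (n.toNat + 1) (pvStart n k) :=
    pv_newton_pos n k hk (by omega) _ (pvStart n k) hs1
  simp [h _ (by omega : (0:Int) ≤ pvNewton n k (n.toNat + 1) (pvStart n k))]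

-- the doubling loop: result = hi·2^j with j ≤ f, its k-th power reaches n, and minimality
theorem pv_double_spec (n k : Int) (hk : 1 ≤ k) :
    ∀ (f : Nat) (hi : Int), 1 ≤ hi → n ≤ 2 ^ f * hi ^ k.toNat →
      ∃ j : Nat, j ≤ f ∧ pvDouble n k hi f = hi * 2 ^ j ∧ n ≤ (hi * 2 ^ j) ^ k.toNat ∧
        (j = 0 ∨ (hi * 2 ^ (j - 1)) ^ k.toNat < n) := by
  intro f
  induction f with
  | zero =>
    intro hi h1 h2
    exact ⟨0, le_refl 0, by simp [pvDouble], by simpa using h2, Or.inl rfl⟩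
  | succ f ih =>
    intro hi h1 h2
    simp only [pvDouble]
    by_cases hlt : hi ^ k.toNat < n
    · rw [if_pos hlt]
      have hk1 : 1 ≤ k.toNat := by omega
      have h2' : n ≤ 2 ^ f * (2 * hi) ^ k.toNat := by
        have hgrow : 2 * hi ^ k.toNat ≤ (2 * hi) ^ k.toNat := by
          rw [mul_pow]
          have h2k : (2:Int) ≤ 2 ^ k.toNat := by
            calc (2:Int) = 2 ^ 1 := (pow_one 2).symm
            _ ≤ 2 ^ k.toNat := pow_le_pow_right₀ (by omega) hk1
          have hp : (0:Int) < hi ^ k.toNat := pow_pos (by omega) _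
          nlinarith
        calc n ≤ 2 ^ (f + 1) * hi ^ k.toNat := h2
        _ = 2 ^ f * (2 * hi ^ k.toNat) := by ring
        _ ≤ 2 ^ f * (2 * hi) ^ k.toNat := by
            have : (0:Int) ≤ 2 ^ f := by positivity
            nlinarith
      obtain ⟨j, hjf, heq, hle, hmin⟩ := ih (2 * hi) (by omega) h2'
      refine ⟨j + 1, by omega, ?_, ?_, ?_⟩
      · rw [heq]; ring
      · have : 2 * hi * 2 ^ j = hi * 2 ^ (j + 1) := by ring
        rwa [this] at hle
      · right
        have hj2 : j + 1 - 1 = j := by omega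
        rw [hj2]
        rcases Nat.eq_zero_or_pos j with h0 | hjpos
        · subst h0; simpa using hlt
        · rcases hmin with h0 | hm
          · omega
          · obtain ⟨i, rfl⟩ : ∃ i, j = i + 1 := ⟨j - 1, by omega⟩
            simp only [Nat.add_sub_cancel] at hm
            have h3 : hi * 2 ^ (i + 1) = 2 * hi * 2 ^ i := by ring
            rwa [h3]
    · rw [if_neg hlt]
      exact ⟨0, by omega, by simp, by simpa using not_lt.mp hlt, Or.inl rfl⟩

-- binary search finds a root strictly inside the bracket (fuel f covers width ≤ 2^f)
theorem pv_bins_some (n k : Int) (hk : 1 ≤ k) :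
    ∀ (f : Nat) (lo hi r : Int), hi - lo ≤ 2 ^ f → 0 ≤ lo → lo < r → r < hi →
      r ^ k.toNat = n → pvBinSearch n k lo hi f = some r := by
  intro f
  induction f with
  | zero => intro lo hi r hw _ h1 h2 _; simp at hw; omega
  | succ f ih =>
    intro lo hi r hw hlo h1 h2 hrn
    have hguard : lo + 1 < hi := by omega
    simp only [pvBinSearch]
    rw [if_pos hguard]
    have hmid : PySem.Int.floordiv (lo + hi) 2 = (lo + hi) / 2 :=
      PySem.Int.floordiv_eq_ediv_of_pos (by norm_num)
    rw [hmid]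
    have hP : (2:Int) ^ (f + 1) = 2 * 2 ^ f := by ring
    have hm1 : lo + 1 ≤ (lo + hi) / 2 := by omega
    have hm2 : (lo + hi) / 2 ≤ hi - 1 := by omega
    by_cases hpe : ((lo + hi) / 2) ^ k.toNat = n
    · rw [if_pos hpe]
      have := pv_pow_inj k.toNat (by omega) ((lo + hi) / 2) r (by omega) (by omega)
        (by rw [hpe, hrn])
      rw [this]
    · rw [if_neg hpe]
      by_cases hplt : ((lo + hi) / 2) ^ k.toNat < n
      · rw [if_pos hplt]
        have hmr : (lo + hi) / 2 < r := by
          by_contra hcon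
          have : r ^ k.toNat ≤ ((lo + hi) / 2) ^ k.toNat :=
            pow_le_pow_left₀ (by omega) (by omega) _
          omega
        exact ih _ _ _ (by omega) (by omega) hmr h2 hrn
      · rw [if_neg hplt]
        have hmr : r < (lo + hi) / 2 := by
          by_contra hcon
          have : ((lo + hi) / 2) ^ k.toNat ≤ r ^ k.toNat :=
            pow_le_pow_left₀ (by omega) (by omega) _
          omega
        exact ih _ _ _ (by omega) hlo h1 hmr hrn

-- binary search returns none when no root lies strictly inside the bracket
theorem pv_bins_none (n k : Int) :
    ∀ (f : Nat) (lo hi : Int), hi - lo ≤ 2 ^ f → 0 ≤ lo →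
      (∀ s : Int, lo < s → s < hi → s ^ k.toNat ≠ n) → pvBinSearch n k lo hi f = none := by
  intro f
  induction f with
  | zero => intro lo hi _ _ _; simp [pvBinSearch]
  | succ f ih =>
    intro lo hi hw hlo h
    simp only [pvBinSearch]
    by_cases hguard : lo + 1 < hi
    · rw [if_pos hguard]
      have hmid : PySem.Int.floordiv (lo + hi) 2 = (lo + hi) / 2 :=
        PySem.Int.floordiv_eq_ediv_of_pos (by norm_num)
      rw [hmid]
      have hP : (2:Int) ^ (f + 1) = 2 * 2 ^ f := by ring
      have hm1 : lo + 1 ≤ (lo + hi) / 2 := by omega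
      have hm2 : (lo + hi) / 2 ≤ hi - 1 := by omega
      rw [if_neg (h _ (by omega) (by omega))]
      by_cases hplt : ((lo + hi) / 2) ^ k.toNat < n
      · rw [if_pos hplt]
        exact ih _ _ (by omega) (by omega) (fun s hs1 hs2 => h s (by omega) hs2)
      · rw [if_neg hplt]
        exact ih _ _ (by omega) hlo (fun s hs1 hs2 => h s hs1 (by omega))
    · rw [if_neg hguard]

-- isqrt bounds
theorem pv_sqrt_lb (n : Int) (h : 0 ≤ n) : Int.sqrt n * Int.sqrt n ≤ n := by
  have h1 : Nat.sqrt n.toNat * Nat.sqrt n.toNat ≤ n.toNat := by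
    have := Nat.sqrt_le' n.toNat
    rwa [pow_two] at this
  have h2 : Int.sqrt n = (Nat.sqrt n.toNat : Int) := rfl
  rw [h2]
  zify at h1
  rwa [Int.toNat_of_nonneg h] at h1

theorem pv_sqrt_ub (n : Int) (h : 0 ≤ n) : n < (Int.sqrt n + 1) * (Int.sqrt n + 1) := by
  have h1 : n.toNat < (Nat.sqrt n.toNat).succ ^ 2 := Nat.lt_succ_sqrt' _
  have h2 : Int.sqrt n = (Nat.sqrt n.toNat : Int) := rfl
  rw [h2]
  have h3 : (((Nat.sqrt n.toNat).succ ^ 2 : Nat) : Int)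
      = ((Nat.sqrt n.toNat : Int) + 1) * ((Nat.sqrt n.toNat : Int) + 1) := by
    push_cast [Nat.succ_eq_add_one]; ring
  have h4 : ((n.toNat : Nat) : Int) < (((Nat.sqrt n.toNat).succ ^ 2 : Nat) : Int) := by
    exact_mod_cast h1
  rw [h3] at h4; omega

theorem pv_sqrt_nonneg (n : Int) : 0 ≤ Int.sqrt n := by simp [Int.sqrt]

-- no nonnegative r with r² = n unless r = isqrt n
theorem pv_sqrt_unique (n r : Int) (hn : 0 ≤ n) (hr : 0 ≤ r) (h : r * r = n) :
    r = Int.sqrt n := by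
  have hlb := pv_sqrt_lb n hn
  have hub := pv_sqrt_ub n hn
  have hs := pv_sqrt_nonneg n
  by_contra hne
  rcases lt_or_gt_of_ne hne with hlt | hgt
  · nlinarith
  · nlinarith

-- the main equivalence, split by A's branches
theorem pv_main (n k : Int) (hdom : Dom_int_nth_root_exact_py n k)
    (hpre : Pre_int_nth_root_exact_py n k) (hnd : ¬ D_int_nth_root_exact_py n k) :
    int_nth_root_exact_py n k = int_nth_root_exact_py_alt n k := by
  have hbound : n ≤ 2147483648 := by
    simp [Dom_int_nth_root_exact_py, pvDomInt] at hdom; omega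
  by_cases h0 : n < 0
  · simp [int_nth_root_exact_py, int_nth_root_exact_py_alt, h0]
  by_cases h1 : k = 1
  · simp [int_nth_root_exact_py, int_nth_root_exact_py_alt, h0, h1]
  by_cases h2 : n = 0 ∨ n = 1
  · have hn2 : n < 2 := by omega
    simp [int_nth_root_exact_py, int_nth_root_exact_py_alt, h0, h1, h2, hn2]
  have hn2 : 2 ≤ n := by omega
  have hk2 : 2 ≤ k := by
    rcases hpre with h | h
    · omega
    · omega
  by_cases hk2' : k = 2
  · subst hk2'
    have hKn : ((2:Int)).toNat = 2 := rfl
    by_cases hs : Int.sqrt n * Int.sqrt n = n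
    · have hr2 : 2 ≤ Int.sqrt n := by
        have := pv_sqrt_nonneg n
        nlinarith
      have hB := pv_alt_some n 2 (Int.sqrt n) hn2 (by omega) hr2 (by rw [hKn, sq]; exact hs)
      rw [hB]
      simp [int_nth_root_exact_py, h0, h1, h2, hs]
    · have hB := pv_alt_none n 2 hn2 (by omega) (fun r hr hrn => by
        rw [hKn, sq] at hrn
        exact hs (by rw [← pv_sqrt_unique n r (by omega) hr hrn]; exact hrn))
      rw [hB]
      simp [int_nth_root_exact_py, h0, h1, h2, hs]
  · have hk3 : 3 ≤ k := by omega
    have hK1 : 1 ≤ k.toNat := by omega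
    have hAeq : int_nth_root_exact_py n k = pvBinSearch n k 0 (pvDouble n k 1 64) 64 := by
      simp [int_nth_root_exact_py, h0, h1, h2, hk2']
    obtain ⟨j, hj64, hH, hnH, hmin⟩ := pv_double_spec n k (by omega) 64 1 (by omega)
      (by norm_num; omega)
    rw [one_mul] at hH hnH
    have hnH' : n ≤ (pvDouble n k 1 64) ^ k.toNat := by rw [hH]; exact hnH
    have hHw : pvDouble n k 1 64 - 0 ≤ 2 ^ 64 := by
      rw [hH]
      have : (2:Int) ^ j ≤ 2 ^ 64 := pow_le_pow_right₀ (by omega) hj64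
      omega
    by_cases hroot : ∃ r : Int, 0 ≤ r ∧ r ^ k.toNat = n
    · obtain ⟨r, hr0, hrn⟩ := hroot
      have hr2 : 2 ≤ r := by
        by_contra hcon
        have : r ^ k.toNat ≤ 1 ^ k.toNat := pow_le_pow_left₀ hr0 (by omega) _
        simp at this; omega
      have hHne : (pvDouble n k 1 64) ^ k.toNat ≠ n := by
        intro he
        apply hnd
        have hj0 : 1 ≤ j := by
          by_contra hj0
          have : j = 0 := by omega
          rw [this] at hH; simp at hH
          rw [hH] at he; simp at he; omega
        have he2 : (2:Int) ^ (j * k.toNat) = n := by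
          rw [← he, hH, ← pow_mul]
        have h31 : (2:Int) ^ (j * k.toNat) ≤ 2 ^ 31 := by
          rw [he2]; norm_num; omega
        have hjk : j * k.toNat ≤ 31 :=
          (pow_le_pow_iff_right₀ (by norm_num : (1:Int) < 2)).mp h31
        have hk3' : 3 ≤ k.toNat := by omega
        refine ⟨hn2, hk3, j, ?_, hjk, he2.symm⟩
        simp only [Finset.mem_Icc]
        constructor
        · exact hj0
        · nlinarith
      have hrH : r < pvDouble n k 1 64 := by
        by_contra hcon
        have hle : (pvDouble n k 1 64) ^ k.toNat ≤ r ^ k.toNat := by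
          apply pow_le_pow_left₀ _ (by omega)
          rw [hH]; positivity
        omega
      rw [hAeq, pv_bins_some n k (by omega) 64 0 (pvDouble n k 1 64) r hHw (by omega)
        (by omega) hrH hrn]
      exact (pv_alt_some n k r hn2 hk2 hr2 hrn).symm
    · push Not at hroot
      rw [hAeq, pv_bins_none n k 64 0 (pvDouble n k 1 64) hHw (by omega)
        (fun s hs1 _ => hroot s (by omega))]
      exact (pv_alt_none n k hn2 hk2 hroot).symm

-- ===== VERDICT (by name: the statement is the Claim_ definition above) =====
theorem int_nth_root_exact_py_spec : Claim_unchanged_int_nth_root_exact_py := by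
  intro n k hdom hpre hnd
  exact pv_main n k hdom hpre hnd

theorem int_nth_root_exact_py_changed : Claim_changed_int_nth_root_exact_py := by
  unfold Claim_changed_int_nth_root_exact_py; decide

theorem int_nth_root_exact_py_tight : Claim_exact_int_nth_root_exact_py := by
  intro n k hdom hpre hd
  obtain ⟨hn2, hk3, j', hj', hjk', hnval⟩ := hd
  simp only [Finset.mem_Icc] at hj'
  have hbound : n ≤ 2147483648 := by
    simp [Dom_int_nth_root_exact_py, pvDomInt] at hdom; omega
  have hK1 : 1 ≤ k.toNat := by omega
  have hrK : ((2:Int) ^ j') ^ k.toNat = n := by rw [← pow_mul, hnval]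
  have hr2 : (2:Int) ≤ 2 ^ j' := by
    calc (2:Int) = 2 ^ 1 := (pow_one 2).symm
    _ ≤ 2 ^ j' := pow_le_pow_right₀ (by omega) (by omega)
  have hB := pv_alt_some n k (2 ^ j') hn2 (by omega) hr2 hrK
  have hAeq : int_nth_root_exact_py n k = pvBinSearch n k 0 (pvDouble n k 1 64) 64 := by
    have hne : ¬ (n = 0 ∨ n = 1) := by omega
    simp only [int_nth_root_exact_py]
    rw [if_neg (by omega), if_neg (by omega), if_neg hne, if_neg (by omega)]
  obtain ⟨j, hj64, hH, hnH, hmin⟩ := pv_double_spec n k (by omega) 64 1 (by omega)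
    (by norm_num; omega)
  rw [one_mul] at hH
  simp only [one_mul] at hnH hmin
  have hjj : j = j' := by
    have h1 : (2:Int) ^ (j' * k.toNat) ≤ 2 ^ (j * k.toNat) := by
      rw [← hnval, pow_mul]; exact hnH
    have hle1 : j' * k.toNat ≤ j * k.toNat :=
      (pow_le_pow_iff_right₀ (by norm_num : (1:Int) < 2)).mp h1
    have hle1' : j' ≤ j := Nat.le_of_mul_le_mul_right hle1 (by omega)
    rcases hmin with h0 | hm
    · omega
    · have h2 : (2:Int) ^ ((j - 1) * k.toNat) < 2 ^ (j' * k.toNat) := by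
        rw [← hnval, pow_mul]; exact hm
      have hlt2 : (j - 1) * k.toNat < j' * k.toNat :=
        (pow_lt_pow_iff_right₀ (by norm_num : (1:Int) < 2)).mp h2
      have : j - 1 < j' := Nat.lt_of_mul_lt_mul_right hlt2
      omega
  have hnone : pvBinSearch n k 0 (pvDouble n k 1 64) 64 = none := by
    apply pv_bins_none n k 64 0 (pvDouble n k 1 64) ?_ (by omega) ?_
    · rw [hH]
      have : (2:Int) ^ j ≤ 2 ^ 64 := pow_le_pow_right₀ (by omega) hj64
      omega
    · intro s hs1 hs2 hsK
      have hs3 : s = 2 ^ j' := pv_pow_inj k.toNat hK1 s (2 ^ j') (by omega) (by omega)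
        (by rw [hsK, hrK])
      rw [hH, hjj] at hs2
      omega
  rw [hAeq, hnone, hB]
  simp
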